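-- pv_equiv track=rewrite | github.com/lgoyal06/LearningPython | swapCase.py | swap_case
-- ===== SOURCE A (Python) =====
-- def swap_case(s):
--     mystr=""
--     for ch in s:
--         code = ord(ch)
--         if code >= 65 and code <=90:
--             mystr = mystr+chr(code+32)
--         elif code >= 97 and code <=122:
--             mystr = mystr+chr(code-32)
--         else:
--             mystr = mystr+ch
--     return mystr
-- ===== SOURCE B (Python) =====
-- def swap_case(s):
--     table = {c: chr(c + 32) for c in range(65, 91)}
--     table.update({c: chr(c - 32) for c in range(97, 123)})
--     return s.translate(table)
-- ===== Notes on version B (the rewrite author's own statement) =====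
-- stated objective: faster
-- what changed: B builds a translation table (dict from ASCII ordinal to swapped-case character) once and does a single str.translate lookup pass, instead of A's per-character range branching with repeated string concatenation.
import Mathlib
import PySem

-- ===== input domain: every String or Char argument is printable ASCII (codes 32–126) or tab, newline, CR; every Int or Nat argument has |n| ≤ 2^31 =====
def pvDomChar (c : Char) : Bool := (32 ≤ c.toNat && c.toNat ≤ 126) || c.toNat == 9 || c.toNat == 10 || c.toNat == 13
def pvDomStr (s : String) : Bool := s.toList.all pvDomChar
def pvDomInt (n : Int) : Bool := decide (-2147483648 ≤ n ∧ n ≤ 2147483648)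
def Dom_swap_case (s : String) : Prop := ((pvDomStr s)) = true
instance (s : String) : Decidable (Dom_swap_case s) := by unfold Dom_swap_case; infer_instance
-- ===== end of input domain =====

-- B builds a translation table once and maps each character through it; A branches per character.

-- ===== PORT A =====
def swap_case (s : String) : String :=
  String.mk (s.toList.foldl (fun mystr ch =>
    let code : Int := (ch.toNat : Int)
    if 65 ≤ code ∧ code ≤ 90 then mystr ++ [Char.ofNat (code + 32).toNat]
    else if 97 ≤ code ∧ code ≤ 122 then mystr ++ [Char.ofNat (code - 32).toNat]
    else mystr ++ [ch]) [])

-- ===== PORT B =====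
-- table = {c: chr(c+32) for c in range(65,91)}; table.update({c: chr(c-32) for c in range(97,123)})
def swapTable : PySem.Dict Int Char :=
  (PySem.Dict.ofList ((PySem.List.pyRange 65 91 1).map (fun c => (c, Char.ofNat (c + 32).toNat)))).update
    ((PySem.List.pyRange 97 123 1).map (fun c => (c, Char.ofNat (c - 32).toNat)))

-- s.translate(table): per-character table lookup, identity for absent keys (exact here: all values are chars)
def swap_case_alt (s : String) : String :=
  String.mk (s.toList.map (fun ch => swapTable.getD (ch.toNat : Int) ch))

-- ===== PRECONDITION & SPEC =====
def Spec_swap_case (s : String) (out : String) : Prop := out = swap_case_alt s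
instance (s : String) (out : String) : Decidable (Spec_swap_case s out) := by unfold Spec_swap_case; infer_instance

-- ===== CLAIM (what is proved, stated in full; the proofs are below) =====
def Claim_equal_swap_case : Prop := ∀ (s : String), Dom_swap_case s → Spec_swap_case s (swap_case s)

-- ===== LEMMAS AND PROOFS =====

lemma tbl_upper (k : Int) (h1 : 65 ≤ k) (h2 : k ≤ 90) :
    swapTable.get? k = some (Char.ofNat (k + 32).toNat) := by
  interval_cases k <;> (set_option maxRecDepth 40000 in decide)

lemma tbl_lower (k : Int) (h1 : 97 ≤ k) (h2 : k ≤ 122) :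
    swapTable.get? k = some (Char.ofNat (k - 32).toNat) := by
  interval_cases k <;> (set_option maxRecDepth 40000 in decide)

lemma tbl_keys :
    swapTable.keys = PySem.List.pyRange 65 91 1 ++ PySem.List.pyRange 97 123 1 := by
  set_option maxRecDepth 40000 in decide

lemma tbl_none (k : Int) (h1 : ¬(65 ≤ k ∧ k ≤ 90)) (h2 : ¬(97 ≤ k ∧ k ≤ 122)) (d : Char) :
    swapTable.getD k d = d := by
  apply PySem.Dict.getD_of_not_contains
  rw [PySem.Dict.contains_eq_decide_mem_keys, tbl_keys]
  simp only [decide_eq_false_iff_not, List.mem_append, PySem.List.mem_pyRange_one]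
  omega

lemma char_eq (ch : Char) :
    (if 65 ≤ (ch.toNat : Int) ∧ (ch.toNat : Int) ≤ 90 then Char.ofNat ((ch.toNat : Int) + 32).toNat
     else if 97 ≤ (ch.toNat : Int) ∧ (ch.toNat : Int) ≤ 122 then Char.ofNat ((ch.toNat : Int) - 32).toNat
     else ch) = swapTable.getD (ch.toNat : Int) ch := by
  by_cases h1 : 65 ≤ (ch.toNat : Int) ∧ (ch.toNat : Int) ≤ 90
  · rw [if_pos h1, PySem.Dict.getD_eq_get?_getD, tbl_upper _ h1.1 h1.2, Option.getD_some]
  · by_cases h2 : 97 ≤ (ch.toNat : Int) ∧ (ch.toNat : Int) ≤ 122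
    · rw [if_neg h1, if_pos h2, PySem.Dict.getD_eq_get?_getD, tbl_lower _ h2.1 h2.2, Option.getD_some]
    · rw [if_neg h1, if_neg h2, tbl_none _ h1 h2]

lemma foldl_eq (l : List Char) (acc : List Char) :
    l.foldl (fun mystr ch =>
      let code : Int := (ch.toNat : Int)
      if 65 ≤ code ∧ code ≤ 90 then mystr ++ [Char.ofNat (code + 32).toNat]
      else if 97 ≤ code ∧ code ≤ 122 then mystr ++ [Char.ofNat (code - 32).toNat]
      else mystr ++ [ch]) acc
    = acc ++ l.map (fun ch => swapTable.getD (ch.toNat : Int) ch) := by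
  induction l generalizing acc with
  | nil => simp
  | cons c t ih =>
    simp only [List.foldl_cons, List.map_cons, ih]
    rw [← char_eq c]
    split_ifs <;> simp

-- ===== VERDICT (by name: the statement is the Claim_ definition above) =====
theorem swap_case_spec : Claim_equal_swap_case := by
  intro s _
  show _ = _
  unfold swap_case swap_case_alt
  rw [foldl_eq]
  simp
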